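-- pv_equiv track=rewrite | github.com/123jimin/advent-of-code | 2023/py/06-1.py | get_num_wins
-- ===== SOURCE A (Python) =====
-- def get_num_wins(time, dist):
--     # Nah just binary search it
--     x = time // 2
--
--     if x * (time - x) <= dist:
--         return 0
--
--     if dist < 0: return time+1
--
--     lb = 0
--     ub = x
--
--     while ub-lb > 1:
--         x = (lb + ub) // 2
--         if x * (time - x) <= dist:
--             lb = x
--         else:
--             ub = x
--
--     x = ub
--
--     return time - 2*x + 1
-- ===== SOURCE B (Python) =====
-- def _isqrt(n):
--     # hand-written Newton's method integer square root (A imports nothing)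
--     if n < 2:
--         return n
--     x = n
--     y = (x + n // x) // 2
--     while y < x:
--         x = y
--         y = (x + n // x) // 2
--     return x
--
-- def get_num_wins(time, dist):
--     # closed form: winning hold times are the integers strictly between the
--     # roots of x*(time-x) = dist, clamped to the race interval [0, time]
--     D = time * time - 4 * dist
--     if D <= 0:
--         return 0
--     s = _isqrt(D)
--     lo = (time - s) // 2
--     if lo * (time - lo) > dist:
--         lo -= 1
--     lo += 1            # lo = smallest integer strictly above the lower root
--     if lo < 0:
--         lo = 0         # a hold time cannot be negative
--     return time - 2 * lo + 1
-- ===== Notes on version B (the rewrite author's own statement) =====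
-- stated objective: alternative
-- what changed: A binary-searches the first winning hold time; B computes it in closed form from the quadratic's discriminant via a hand-written Newton integer square root, with a single one-step boundary adjustment instead of a search loop.
-- outside the precondition, e.g. on get_num_wins(-3, 0): A returns 2, B returns -2; on get_num_wins(-4, 0): A returns 1, B returns -3
import Mathlib
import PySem

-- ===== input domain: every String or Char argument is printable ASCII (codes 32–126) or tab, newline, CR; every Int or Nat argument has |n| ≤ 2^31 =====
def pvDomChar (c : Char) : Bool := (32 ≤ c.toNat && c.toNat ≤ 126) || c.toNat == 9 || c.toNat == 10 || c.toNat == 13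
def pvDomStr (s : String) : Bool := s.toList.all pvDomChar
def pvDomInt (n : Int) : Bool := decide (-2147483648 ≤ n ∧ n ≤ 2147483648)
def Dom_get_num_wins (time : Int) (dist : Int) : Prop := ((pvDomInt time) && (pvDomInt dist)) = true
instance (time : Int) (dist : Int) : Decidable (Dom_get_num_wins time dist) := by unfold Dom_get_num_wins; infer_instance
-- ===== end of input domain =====

-- B replaces A's binary search by the closed-form quadratic: an integer square
-- root of the discriminant gives the smallest winning hold time directly.

-- ===== PORT A =====
-- the while loop of A: returns the final ub
def pvLoopA (time : Int) (dist : Int) (lb : Int) (ub : Int) : Int :=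
  if h : ub - lb > 1 then
    let x := PySem.Int.floordiv (lb + ub) 2
    if x * (time - x) ≤ dist then pvLoopA time dist x ub
    else pvLoopA time dist lb x
  else ub
termination_by (ub - lb).toNat
decreasing_by
  · have h1 : lb + 1 ≤ PySem.Int.floordiv (lb + ub) 2 :=
      (PySem.Int.le_floordiv_iff_mul_le (by norm_num)).2 (by omega)
    omega
  · have h2 : PySem.Int.floordiv (lb + ub) 2 < ub :=
      (PySem.Int.floordiv_lt_iff_lt_mul (by norm_num)).2 (by omega)
    have h1 : lb ≤ PySem.Int.floordiv (lb + ub) 2 :=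
      (PySem.Int.le_floordiv_iff_mul_le (by norm_num)).2 (by omega)
    omega

def get_num_wins (time : Int) (dist : Int) : Int :=
  let x := PySem.Int.floordiv time 2
  if x * (time - x) ≤ dist then 0
  else if dist < 0 then time + 1
  else time - 2 * pvLoopA time dist 0 x + 1

-- ===== PORT B =====
-- Newton iteration of Source B's _isqrt; the `0 < x` conjunct in the guard only
-- makes the recursion total (on every reached state x ≥ 1, so it never fires)
def pvIsqrtGo (n : Int) (x : Int) : Int :=
  let y := PySem.Int.floordiv (x + PySem.Int.floordiv n x) 2
  if h : 0 < x ∧ y < x then pvIsqrtGo n y else x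
termination_by x.toNat
decreasing_by omega

def pvIsqrt (n : Int) : Int :=
  if n < 2 then n else pvIsqrtGo n n

def get_num_wins_alt (time : Int) (dist : Int) : Int :=
  let D := time * time - 4 * dist
  if D ≤ 0 then 0
  else
    let s := pvIsqrt D
    let lo0 := PySem.Int.floordiv (time - s) 2
    let lo1 := if lo0 * (time - lo0) > dist then lo0 - 1 else lo0
    let lo2 := lo1 + 1
    let lo3 := if lo2 < 0 then 0 else lo2
    time - 2 * lo3 + 1

-- ===== PRECONDITION & SPEC =====
-- Pre_ restricts to the natural domain 0 ≤ time (a race duration): for negative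
-- time A's binary-search bounds are inverted (the loop never runs) and its
-- values there are artefacts of the skipped loop, which B does not mimic.
def Pre_get_num_wins (time : Int) (dist : Int) : Prop := 0 ≤ time
instance (time : Int) (dist : Int) : Decidable (Pre_get_num_wins time dist) := by
  unfold Pre_get_num_wins; infer_instance

def pvWitness_get_num_wins : Int × Int := (7, 9)

def Spec_get_num_wins (time : Int) (dist : Int) (out : Int) : Prop := out = get_num_wins_alt time dist
instance (time : Int) (dist : Int) (out : Int) : Decidable (Spec_get_num_wins time dist out) := by
  unfold Spec_get_num_wins; infer_instance

-- ===== CLAIM (what is proved, stated in full; the proofs are below) =====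
def Claim_equal_get_num_wins : Prop := ∀ (time : Int) (dist : Int), Dom_get_num_wins time dist → Pre_get_num_wins time dist → Spec_get_num_wins time dist (get_num_wins time dist)

-- ===== LEMMAS AND PROOFS =====

theorem pvWitness_ok : Dom_get_num_wins pvWitness_get_num_wins.1 pvWitness_get_num_wins.2 ∧
    Pre_get_num_wins pvWitness_get_num_wins.1 pvWitness_get_num_wins.2 := by decide

-- Newton loop correctness: from any over-approximation x of √n it returns ⌊√n⌋
theorem pvIsqrtGo_spec (n : Int) : ∀ (k : Nat) (x : Int), x.toNat ≤ k → 0 < x → 2 ≤ n →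
    n < (x + 1) * (x + 1) →
    0 < pvIsqrtGo n x ∧ pvIsqrtGo n x * pvIsqrtGo n x ≤ n ∧
      n < (pvIsqrtGo n x + 1) * (pvIsqrtGo n x + 1) := by
  intro k
  induction k with
  | zero => intro x hk hx _ _; omega
  | succ k ih =>
    intro x hk hx hn hub
    rw [pvIsqrtGo]
    set q := PySem.Int.floordiv n x with hq
    set y := PySem.Int.floordiv (x + q) 2 with hy
    have hq0 : 0 ≤ q := by
      rw [hq, PySem.Int.floordiv_eq_ediv_of_pos hx]; exact Int.ediv_nonneg (by omega) (by omega)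
    have hyb : y * 2 ≤ x + q ∧ x + q < (y + 1) * 2 :=
      (PySem.Int.floordiv_eq_iff_of_pos (by norm_num)).1 hy.symm
    by_cases hrec : 0 < x ∧ y < x
    · simp only [hrec, dif_pos, and_true]
      -- facts for the recursive call
      have hmod := PySem.Int.floordiv_mul_add_mod n x
      have hm0 := PySem.Int.mod_nonneg n hx
      have hm1 := PySem.Int.mod_lt n hx
      have hq2 : x = 1 → q = n := by intro h1; rw [hq, h1]; simpa using PySem.Int.floordiv_eq_ediv_of_pos (by norm_num)
      have hxq2 : 2 ≤ x + q := by
        by_cases h1 : x = 1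
        · have := hq2 h1; omega
        · omega
      have hy0 : 0 < y := by omega
      -- AM–GM step: n < (y+1)^2
      have hyub : n < (y + 1) * (y + 1) := by
        have h1 : n < x * (q + 1) := by nlinarith [hmod, hm0, hm1]
        nlinarith [sq_nonneg (x - q - 1), hyb.1, hyb.2]
      exact ih y (by omega) hy0 hn hyub
    · simp only [hrec, dif_neg, not_false_iff]
      have hyx : x ≤ y := by omega
      have hqx : x ≤ q := by omega
      have hxx : x * x ≤ n := by
        have := (PySem.Int.le_floordiv_iff_mul_le hx).2 (le_refl (x * x))
        exact (PySem.Int.le_floordiv_iff_mul_le hx).1 (by omega)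
      exact ⟨hx, hxx, hub⟩

theorem pvIsqrt_spec (n : Int) (hn : 1 ≤ n) :
    0 < pvIsqrt n ∧ pvIsqrt n * pvIsqrt n ≤ n ∧ n < (pvIsqrt n + 1) * (pvIsqrt n + 1) := by
  rw [pvIsqrt]
  by_cases h : n < 2
  · have : n = 1 := by omega
    subst this; norm_num
  · simp only [h, if_false]
    exact pvIsqrtGo_spec n n.toNat n (le_refl _) (by omega) (by omega) (by nlinarith)

-- "x wins" rewritten through the discriminant: x(t-x) > d  ↔  (2x-t)² < t²-4d
theorem win_iff_sq (time dist x : Int) :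
    x * (time - x) > dist ↔ (2 * x - time) * (2 * x - time) < time * time - 4 * dist := by
  constructor <;> intro h <;> nlinarith

-- a "first winner" (wins while its predecessor loses) is unique
theorem first_winner_unique (time dist u v : Int)
    (hu : u * (time - u) > dist) (hu1 : ¬ (u - 1) * (time - (u - 1)) > dist)
    (hv : v * (time - v) > dist) (hv1 : ¬ (v - 1) * (time - (v - 1)) > dist) : u = v := by
  rw [win_iff_sq] at hu hv
  rw [win_iff_sq] at hu1 hv1
  push_neg at hu1 hv1
  rcases lt_trichotomy u v with h | h | h
  · exfalso; nlinarith
  · exact h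
  · exfalso; nlinarith

-- A's binary search returns a first winner
theorem pvLoopA_spec (time dist : Int) : ∀ (k : Nat) (lb ub : Int), (ub - lb).toNat ≤ k →
    lb < ub → ¬ lb * (time - lb) > dist → ub * (time - ub) > dist →
    pvLoopA time dist lb ub * (time - pvLoopA time dist lb ub) > dist ∧
      ¬ (pvLoopA time dist lb ub - 1) * (time - (pvLoopA time dist lb ub - 1)) > dist := by
  intro k
  induction k with
  | zero => intro lb ub hk hlt _ _; omega
  | succ k ih =>
    intro lb ub hk hlt hlb hub
    rw [pvLoopA]
    by_cases h : ub - lb > 1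
    · simp only [h, dif_pos]
      set x := PySem.Int.floordiv (lb + ub) 2 with hx
      have h1 : lb + 1 ≤ x := (PySem.Int.le_floordiv_iff_mul_le (by norm_num)).2 (by omega)
      have h2 : x < ub := (PySem.Int.floordiv_lt_iff_lt_mul (by norm_num)).2 (by omega)
      by_cases hw : x * (time - x) ≤ dist
      · simp only [hw, if_pos]
        exact ih x ub (by omega) (by omega) (by omega) hub
      · simp only [hw, if_neg, not_false_iff]
        exact ih lb x (by omega) (by omega) hlb (by omega)
    · simp only [h, dif_neg, not_false_iff]
      have : ub - lb = 1 := by omega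
      have : ub - 1 = lb := by omega
      rw [this]; exact ⟨hub, hlb⟩

-- ===== VERDICT (by name: the statement is the Claim_ definition above) =====
theorem get_num_wins_spec : Claim_equal_get_num_wins := by
  intro time dist _ hpre
  unfold Pre_get_num_wins at hpre
  unfold Spec_get_num_wins get_num_wins get_num_wins_alt
  simp only []
  set x0 := PySem.Int.floordiv time 2 with hx0
  have hx0b : x0 * 2 ≤ time ∧ time < (x0 + 1) * 2 :=
    (PySem.Int.floordiv_eq_iff_of_pos (by norm_num)).1 hx0.symm
  set m := time - 2 * x0 with hm
  have hm01 : m = 0 ∨ m = 1 := by omega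
  have hx0nn : 0 ≤ x0 := by omega
  by_cases hA1 : x0 * (time - x0) ≤ dist
  · -- A returns 0
    rw [if_pos hA1]
    have hDle : time * time - 4 * dist ≤ m * m := by nlinarith
    have hD1 : time * time - 4 * dist ≤ 1 := by
      rcases hm01 with h | h <;> rw [h] at hDle <;> omega
    by_cases hD0 : time * time - 4 * dist ≤ 0
    · rw [if_pos hD0]
    · rw [if_neg hD0]
      have hDeq : time * time - 4 * dist = 1 := by omega
      -- m = 1 (time odd), since D ≡ m² mod 4
      have hm1 : m = 1 := by
        rcases hm01 with h | h
        · exfalso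
          have ht : time = 2 * x0 := by omega
          have : 4 * (x0 * x0 - dist) = 1 := by nlinarith
          set c := x0 * x0 - dist with hc
          omega
        · exact h
      have hs : pvIsqrt (time * time - 4 * dist) = 1 := by rw [hDeq]; decide
      rw [hs]
      have hlo0 : PySem.Int.floordiv (time - 1) 2 = x0 :=
        (PySem.Int.floordiv_eq_iff_of_pos (by norm_num)).2 ⟨by omega, by omega⟩
      rw [hlo0, if_neg (by omega : ¬ x0 * (time - x0) > dist)]
      rw [if_neg (by omega : ¬ x0 + 1 < 0)]
      omega
  · rw [if_neg hA1]
    have hwinx0 : x0 * (time - x0) > dist := by omega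
    have hDm : m * m < time * time - 4 * dist := (win_iff_sq time dist x0).1 hwinx0 |>.trans_le' (by nlinarith) |>.trans_le (le_refl _) |>.trans_le (by nlinarith)
    have hD1 : 1 ≤ time * time - 4 * dist := by
      have := (win_iff_sq time dist x0).1 hwinx0
      nlinarith
    rw [if_neg (by omega : ¬ time * time - 4 * dist ≤ 0)]
    obtain ⟨hs0, hs1, hs2⟩ := pvIsqrt_spec (time * time - 4 * dist) hD1
    set s := pvIsqrt (time * time - 4 * dist) with hsdef
    set lo0 := PySem.Int.floordiv (time - s) 2 with hlo0
    have hlo0b : lo0 * 2 ≤ time - s ∧ time - s < (lo0 + 1) * 2 :=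
      (PySem.Int.floordiv_eq_iff_of_pos (by norm_num)).1 hlo0.symm
    set ρ := time - s - 2 * lo0 with hρ
    have hρ01 : ρ = 0 ∨ ρ = 1 := by omega
    by_cases hA2 : dist < 0
    · -- A returns time + 1; B's lo clamps to 0
      rw [if_pos hA2]
      have hst : s ≥ time := by nlinarith
      have hlo0n : lo0 ≤ 0 := by omega
      by_cases hw : lo0 * (time - lo0) > dist
      · rw [if_pos hw]
        by_cases hz : lo0 - 1 + 1 < 0
        · rw [if_pos hz]; omega
        · rw [if_neg hz]; omega
      · rw [if_neg hw]
        have hlo0ne : lo0 ≠ 0 := by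
          intro h; apply hw; rw [h]; simpa using hA2
        by_cases hz : lo0 + 1 < 0
        · rw [if_pos hz]; omega
        · rw [if_neg hz]; omega
    · -- main case: both compute time - 2·(first winner) + 1
      rw [if_neg hA2]
      have hd0 : 0 ≤ dist := by omega
      have hx0pos : 0 < x0 := by
        rcases eq_or_lt_of_le hx0nn with h | h
        · exfalso; rw [← h] at hwinx0; simp at hwinx0; omega
        · exact h
      obtain ⟨hu1, hu2⟩ := pvLoopA_spec time dist (x0 - 0).toNat 0 x0 (le_refl _)
        hx0pos (by simp only [zero_mul, gt_iff_lt]; omega) hwinx0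
      set u := pvLoopA time dist 0 x0 with hu
      -- B's first winner L
      have hkey : ∃ L : Int,
          (if lo0 * (time - lo0) > dist then lo0 - 1 else lo0) + 1 = L ∧
          L * (time - L) > dist ∧ ¬ (L - 1) * (time - (L - 1)) > dist := by
        by_cases hw : lo0 * (time - lo0) > dist
        · refine ⟨lo0, by simp only [if_pos hw]; omega, hw, ?_⟩
          rw [win_iff_sq]; push_neg
          have : 2 * (lo0 - 1) - time = -(s + ρ + 2) := by omega
          rw [this]; nlinarith
        · refine ⟨lo0 + 1, by rw [if_neg hw], ?_, by simpa using hw⟩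
          rw [win_iff_sq]
          have he : 2 * (lo0 + 1) - time = -(s + ρ - 2) := by omega
          rw [he]
          have hwsq : (s + ρ) * (s + ρ) ≥ time * time - 4 * dist := by
            have := (win_iff_sq time dist lo0).not.1 hw
            push_neg at this
            have h2 : 2 * lo0 - time = -(s + ρ) := by omega
            rw [h2] at this; nlinarith
          rcases hρ01 with h | h
          · -- ρ = 0 ⇒ D = s², and s ≥ 2 by parity
            have hDs : time * time - 4 * dist = s * s := by
              rw [h] at hwsq; nlinarith
            have hs2' : 2 ≤ s := by
              by_contra hlt
              have hseq : s = 1 := by omega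
              have hm0 : m = 0 := by
                rcases hm01 with h' | h'
                · exact h'
                · exfalso; rw [h'] at hDm; rw [hseq] at hDs; omega
              -- time even but time - s = 2·lo0 with s = 1 makes time odd
              omega
            rw [h, hDs]; nlinarith
          · rw [h]; nlinarith
      obtain ⟨L, hLdef, hLwin, hLpred⟩ := hkey
      rw [hLdef]
      have hL1 : 1 ≤ L := by
        by_contra hc
        push_neg at hc
        nlinarith
      rw [if_neg (by omega : ¬ L < 0)]
      have : u = L := first_winner_unique time dist u L hu1 hu2 hLwin hLpred
      omega
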